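-- pv_equiv track=rewrite | github.com/flora-atropa/excorzism | advent-of-code/2015/day03/b/__init__.py | calculate_visited_houses
-- ===== SOURCE A (Python) =====
-- class Position:
--     def __init__(self, x: int, y: int) -> None:
--         self.x = x
--         self.y = y
--
--     def __str__(self) -> str:
--         return f"{self.x}:{self.y}"
--
-- def convert_direction_to_ints(direction: str) -> tuple[int, int]:
--     if direction == "^":
--         return 0, 1
--     elif direction == ">":
--         return 1, 0
--     elif direction == "<":
--         return -1, 0
--     elif direction == "v":
--         return 0, -1
--     else:
--         raise ValueError("Unknow Direction Input")
--
-- def calculate_visited_houses(directions: str) -> list: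
--     position_santa = Position(0, 0)
--     position_robosanta = Position(0, 0)
--
--     visited_houses: list[str] = [str(position_santa), str(position_robosanta)]
--
--     odd = False
--
--     for direction in directions:
--         move = convert_direction_to_ints(direction)
--
--         if odd:
--             position_robosanta.x += move[0]
--             position_robosanta.y += move[1]
--
--             visited_houses.append(str(position_robosanta))
--         else:
--             position_santa.x += move[0]
--             position_santa.y += move[1]
--
--             visited_houses.append(str(position_santa))
--
--         odd = not odd
--
--     return visited_houses
-- ===== SOURCE B (Python) =====
-- def _step(direction):
--     if direction == "^":
--         return 0, 1
--     if direction == ">":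
--         return 1, 0
--     if direction == "<":
--         return -1, 0
--     if direction == "v":
--         return 0, -1
--     raise ValueError("Unknow Direction Input")
--
--
-- def _trajectory(moves):
--     x = y = 0
--     houses = [f"{x}:{y}"]
--     for d in moves:
--         dx, dy = _step(d)
--         x += dx
--         y += dy
--         houses.append(f"{x}:{y}")
--     return houses
--
--
-- def calculate_visited_houses(directions: str) -> list:
--     santa = _trajectory(directions[0::2])
--     robo = _trajectory(directions[1::2])
--     visited = [h for pair in zip(santa, robo) for h in pair]
--     if len(santa) > len(robo):
--         visited.append(santa[-1])
--     return visited
-- ===== Notes on version B (the rewrite author's own statement) =====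
-- stated objective: alternative
-- what changed: B splits the input by index parity, builds each santa's cumulative trajectory independently, and interleaves the two lists with zip (plus santa's trailing element for odd-length input), replacing A's single pass over mutable Position objects with an odd/even flag.
import Mathlib
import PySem

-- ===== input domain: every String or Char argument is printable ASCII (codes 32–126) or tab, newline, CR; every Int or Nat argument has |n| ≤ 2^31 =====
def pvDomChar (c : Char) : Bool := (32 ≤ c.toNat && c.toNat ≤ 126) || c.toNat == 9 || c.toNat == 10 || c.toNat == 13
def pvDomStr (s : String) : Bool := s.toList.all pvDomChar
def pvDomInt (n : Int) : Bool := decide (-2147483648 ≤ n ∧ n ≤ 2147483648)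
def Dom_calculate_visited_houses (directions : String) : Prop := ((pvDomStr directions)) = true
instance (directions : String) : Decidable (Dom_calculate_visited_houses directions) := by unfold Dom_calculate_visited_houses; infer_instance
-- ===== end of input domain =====

-- B rebuilds the result as the two santas' separate cumulative trajectories (input split by
-- index parity) interleaved by zip, instead of A's single pass with mutable positions and an
-- odd/even flag; objective: alternative decomposition, same O(n) cost.

-- ===== PORT A =====
-- convert_direction_to_ints; none = the ValueError branch (excluded by Pre_)
def pvConv (c : Char) : Option (Int × Int) :=
  if c = '^' then some (0, 1)
  else if c = '>' then some (1, 0)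
  else if c = '<' then some (-1, 0)
  else if c = 'v' then some (0, -1)
  else none

-- str(Position(x, y)) = f"{x}:{y}"
def pvPos (x y : Int) : String := PySem.Int.toStr x ++ ":" ++ PySem.Int.toStr y

-- the for-loop of A: state (santa x y, robo x y, odd flag, visited accumulator)
def pvGoA : List Char → Int → Int → Int → Int → Bool → List String → List String
  | [], _, _, _, _, _, vis => vis
  | c :: rest, sx, sy, rx, ry, odd, vis =>
    match pvConv c with
    | none => vis   -- ValueError raised: input outside Pre_
    | some (mx, my) =>
      if odd then pvGoA rest sx sy (rx + mx) (ry + my) (!odd) (vis ++ [pvPos (rx + mx) (ry + my)])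
      else pvGoA rest (sx + mx) (sy + my) rx ry (!odd) (vis ++ [pvPos (sx + mx) (sy + my)])

def calculate_visited_houses (directions : String) : List String :=
  pvGoA directions.toList 0 0 0 0 false [pvPos 0 0, pvPos 0 0]

-- ===== PORT B =====
-- _trajectory's append loop (houses accumulator)
def pvTrajGo : List Char → Int → Int → List String → List String
  | [], _, _, hs => hs
  | c :: rest, x, y, hs =>
    match pvConv c with
    | none => hs   -- ValueError raised by _step: input outside Pre_
    | some (mx, my) => pvTrajGo rest (x + mx) (y + my) (hs ++ [pvPos (x + mx) (y + my)])

def pvTraj (moves : List Char) : List String := pvTrajGo moves 0 0 [pvPos 0 0]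

def calculate_visited_houses_alt (directions : String) : List String :=
  let santa := pvTraj ((PySem.List.slice? directions.toList (some 0) none 2).getD [])
  let robo := pvTraj ((PySem.List.slice? directions.toList (some 1) none 2).getD [])
  ((santa.zip robo).flatMap (fun p => [p.1, p.2])) ++
    (if robo.length < santa.length then [santa.getLastD ""] else [])

-- ===== PRECONDITION & SPEC =====
-- Pre_ excludes exactly the inputs containing a character other than '^','>','<','v',
-- on which A raises ValueError (and B raises the same ValueError).
def Pre_calculate_visited_houses (directions : String) : Prop :=
  (directions.toList.all fun c => c == '^' || c == '>' || c == '<' || c == 'v') = true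

instance (directions : String) : Decidable (Pre_calculate_visited_houses directions) := by
  unfold Pre_calculate_visited_houses; infer_instance

def pvWitness_calculate_visited_houses : String := "^>v<"

def Spec_calculate_visited_houses (directions : String) (out : List String) : Prop := out = calculate_visited_houses_alt directions
instance (directions : String) (out : List String) : Decidable (Spec_calculate_visited_houses directions out) := by unfold Spec_calculate_visited_houses; infer_instance

-- ===== CLAIM (what is proved, stated in full; the proofs are below) =====
def Claim_equal_calculate_visited_houses : Prop := ∀ (directions : String), Dom_calculate_visited_houses directions → Pre_calculate_visited_houses directions → Spec_calculate_visited_houses directions (calculate_visited_houses directions)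

-- ===== LEMMAS AND PROOFS =====

-- characters at even indices (what xs[0::2] selects)
def pvEvens {α : Type} : List α → List α
  | [] => []
  | [c] => [c]
  | c :: _ :: rest => c :: pvEvens rest

-- the houses A's loop appends (head-recursive form of pvGoA, without the accumulator)
def pvM : List Char → Int → Int → Int → Int → Bool → List String
  | [], _, _, _, _, _ => []
  | c :: rest, sx, sy, rx, ry, odd =>
    match pvConv c with
    | none => []
    | some (mx, my) =>
      if odd then pvPos (rx + mx) (ry + my) :: pvM rest sx sy (rx + mx) (ry + my) (!odd)
      else pvPos (sx + mx) (sy + my) :: pvM rest (sx + mx) (sy + my) rx ry (!odd)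

-- head-recursive form of pvTrajGo
def pvTrajT : List Char → Int → Int → List String
  | [], _, _ => []
  | c :: rest, x, y =>
    match pvConv c with
    | none => []
    | some (mx, my) => pvPos (x + mx) (y + my) :: pvTrajT rest (x + mx) (y + my)

theorem pvGoA_eq (l : List Char) : ∀ (sx sy rx ry : Int) (odd : Bool) (vis : List String),
    pvGoA l sx sy rx ry odd vis = vis ++ pvM l sx sy rx ry odd := by
  induction l with
  | nil => intros; simp [pvGoA, pvM]
  | cons c rest ih =>
    intro sx sy rx ry odd vis
    cases h : pvConv c with
    | none => simp [pvGoA, pvM, h]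
    | some m =>
      obtain ⟨mx, my⟩ := m
      cases odd <;> simp [pvGoA, pvM, h, ih]

theorem pvTrajGo_eq (l : List Char) : ∀ (x y : Int) (hs : List String),
    pvTrajGo l x y hs = hs ++ pvTrajT l x y := by
  induction l with
  | nil => intros; simp [pvTrajGo, pvTrajT]
  | cons c rest ih =>
    intro x y hs
    cases h : pvConv c with
    | none => simp [pvTrajGo, pvTrajT, h]
    | some m =>
      obtain ⟨mx, my⟩ := m
      simp [pvTrajGo, pvTrajT, h, ih]

theorem pvFilterMap_evens {α : Type} (xs : List α) :
    List.filterMap (fun k => xs[2 * k]?) (List.range ((xs.length + 1) / 2)) = pvEvens xs := by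
  induction xs using pvEvens.induct with
  | case1 => simp [pvEvens]
  | case2 c => simp [pvEvens]
  | case3 c d rest ih =>
    have hcnt : ((c :: d :: rest).length + 1) / 2 = (rest.length + 1) / 2 + 1 := by
      simp [List.length_cons]; omega
    rw [hcnt, List.range_succ_eq_map, List.filterMap_cons, List.filterMap_map]
    simp only [Nat.mul_zero, List.getElem?_cons_zero]
    have : (fun k => (c :: d :: rest)[2 * k]?) ∘ Nat.succ = fun k => rest[2 * k]? := by
      funext k
      have h2 : 2 * Nat.succ k = (2 * k).succ.succ := by omega
      simp [h2]
    rw [this, ih]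
    rfl

theorem pvSlice_evens {α : Type} (xs : List α) :
    PySem.List.slice? xs (some 0) none 2 = some (pvEvens xs) := by
  simp only [PySem.List.slice?, PySem.List.sliceIndices]
  norm_num
  have hcnt : (if 0 < xs.length then (((xs.length : Int) + 2 - 1) / 2).toNat else 0)
      = (xs.length + 1) / 2 := by
    split <;> omega
  rw [hcnt]
  have hfun : (fun (x : Nat) => xs[(2 * (x : Int)).toNat]?) = fun k => xs[2 * k]? := by
    funext k
    have h2 : ((2 : Int) * (k : Int)).toNat = 2 * k := by omega
    rw [h2]
  rw [hfun, pvFilterMap_evens]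

theorem pvSlice_odds {α : Type} (xs : List α) :
    PySem.List.slice? xs (some 1) none 2 = some (pvEvens xs.tail) := by
  simp only [PySem.List.slice?, PySem.List.sliceIndices]
  norm_num
  cases xs with
  | nil => simp [pvEvens]
  | cons a t =>
    have hcnt : (if 1 < (a :: t).length then
        (((a :: t).length : Int) - min 1 ((a :: t).length : Int) + 2 - 1) / 2 |>.toNat else 0)
        = (t.length + 1) / 2 := by
      simp only [List.length_cons]
      split <;> omega
    rw [hcnt]
    have hfun : (fun (x : Nat) => (a :: t)[(min 1 ((a :: t).length : Int) + 2 * (x : Int)).toNat]?)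
        = fun k => t[2 * k]? := by
      funext k
      have h1 : (min 1 ((a :: t).length : Int) + 2 * (k : Int)).toNat = (2 * k) + 1 := by
        simp only [List.length_cons]; omega
      rw [h1]
      simp [List.getElem?_cons_succ]
    rw [hfun, pvFilterMap_evens]
    simp

theorem pvEvens_cons {α : Type} (d : α) (rest : List α) :
    pvEvens (d :: rest) = d :: pvEvens rest.tail := by
  cases rest <;> simp [pvEvens]

-- pvConv is total on valid direction characters
theorem pvConv_valid (c : Char) (h : c = '^' ∨ c = '>' ∨ c = '<' ∨ c = 'v') :
    ∃ m, pvConv c = some m := by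
  rcases h with h | h | h | h <;> subst h <;> simp [pvConv]

-- main interleaving lemma
theorem pvMain (l : List Char) : ∀ (sx sy rx ry : Int),
    (∀ c ∈ l, c = '^' ∨ c = '>' ∨ c = '<' ∨ c = 'v') →
    (((pvPos sx sy :: pvTrajT (pvEvens l) sx sy).zip
        (pvPos rx ry :: pvTrajT (pvEvens l.tail) rx ry)).flatMap (fun p => [p.1, p.2])) ++
      (if (pvPos rx ry :: pvTrajT (pvEvens l.tail) rx ry).length <
          (pvPos sx sy :: pvTrajT (pvEvens l) sx sy).length
        then [(pvPos sx sy :: pvTrajT (pvEvens l) sx sy).getLastD ""] else []) =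
    pvPos sx sy :: pvPos rx ry :: pvM l sx sy rx ry false := by
  induction l using pvEvens.induct with
  | case1 =>
    intro sx sy rx ry _
    simp [pvEvens, pvTrajT, pvM]
  | case2 c =>
    intro sx sy rx ry hv
    obtain ⟨⟨mx, my⟩, hc⟩ := pvConv_valid c (hv c (by simp))
    simp [pvEvens, pvTrajT, pvM, hc, List.getLastD]
  | case3 c d rest ih =>
    intro sx sy rx ry hv
    obtain ⟨⟨mx, my⟩, hc⟩ := pvConv_valid c (hv c (by simp))
    obtain ⟨⟨nx, ny⟩, hd⟩ := pvConv_valid d (hv d (by simp))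
    have hv' : ∀ e ∈ rest, e = '^' ∨ e = '>' ∨ e = '<' ∨ e = 'v' := by
      intro e he; exact hv e (by simp [he])
    have ihh := ih (sx + mx) (sy + my) (rx + nx) (ry + ny) hv'
    simp only [pvEvens, List.tail_cons, pvEvens_cons, pvTrajT, hc, hd, pvM, Bool.not_false,
      Bool.not_true, List.zip_cons_cons, List.flatMap_cons, List.length_cons]
    simp only [List.zip_cons_cons, List.flatMap_cons, List.length_cons] at ihh
    simp only [Bool.false_eq_true, if_false, if_true]
    have hlast : (pvPos sx sy :: pvPos (sx + mx) (sy + my) ::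
        pvTrajT (pvEvens rest) (sx + mx) (sy + my)).getLastD "" =
        (pvPos (sx + mx) (sy + my) :: pvTrajT (pvEvens rest) (sx + mx) (sy + my)).getLastD "" := by
      simp [List.getLastD_eq_getLast?]
    rw [hlast]
    simp only [Nat.add_lt_add_iff_right] at ihh ⊢
    rw [List.append_assoc, ihh]
    rfl

-- ===== VERDICT (by name: the statement is the Claim_ definition above) =====
theorem calculate_visited_houses_spec : Claim_equal_calculate_visited_houses := by
  intro directions _ hpre
  unfold Pre_calculate_visited_houses at hpre
  simp only [List.all_eq_true, Bool.or_eq_true, beq_iff_eq] at hpre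
  have hpre' : ∀ c ∈ directions.toList, c = '^' ∨ c = '>' ∨ c = '<' ∨ c = 'v' := by
    intro c hc
    have := hpre c hc
    tauto
  unfold Spec_calculate_visited_houses
  unfold calculate_visited_houses calculate_visited_houses_alt
  rw [pvSlice_evens, pvSlice_odds]
  simp only [Option.getD_some]
  unfold pvTraj
  rw [pvTrajGo_eq, pvTrajGo_eq, pvGoA_eq]
  simp only [List.singleton_append]
  rw [pvMain directions.toList 0 0 0 0 hpre']
  rfl
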